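-- pv_equiv track=rewrite | github.com/OcMalde/fuse-phylotree | fuse-phylotree/modules_repartition.py | modules_by_domains
-- ===== SOURCE A (Python) =====
-- def modules_by_domains(module_list, dict_region_genePos, dict_module_genePos) -> dict:
--     """
--     Associate modules with region they are localised in
--     (If a modules, in 2 descendants is present in 2 different regions, we associate it with both)
--     Return a dict
--     { region : [module list] }
--     """
--     dict_region_moduleList = {region : [] for region in dict_region_genePos}
--     for region, gene_Rpos in dict_region_genePos.items():
--         # By gene
--         for gene, r_pos in gene_Rpos.items():
--             r_start, r_stop = r_pos[0], r_pos[1]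
--             # Check for each module if its in this region
--             for module in dict_module_genePos:
--                 m_info = dict_module_genePos[module]
--                 if gene in m_info:
--                     m_pos = dict_module_genePos[module][gene]
--                     m_start, m_stop = m_pos[0], m_pos[1]
--                     # If in it, add it to region
--                     if int(m_stop) >= int(r_start)-50 and int(r_stop)+50 >= int(m_start):
--                         if module not in dict_region_moduleList[region]:
--                             dict_region_moduleList[region].append(module)
--     return dict_region_moduleList
-- ===== SOURCE B (Python) =====
-- def modules_by_domains(module_list, dict_region_genePos, dict_module_genePos) -> dict:
--     # Index gene -> [(module, m_pos)] once, then per region-gene visit only matching modules.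
--     gene_index = {}
--     for module, m_info in dict_module_genePos.items():
--         for gene, m_pos in m_info.items():
--             gene_index.setdefault(gene, []).append((module, m_pos))
--     result = {}
--     for region, gene_Rpos in dict_region_genePos.items():
--         mods = []
--         seen = set()
--         for gene, r_pos in gene_Rpos.items():
--             lo = int(r_pos[0]) - 50
--             hi = int(r_pos[1]) + 50
--             for module, m_pos in gene_index.get(gene, ()):
--                 m_start, m_stop = int(m_pos[0]), int(m_pos[1])
--                 if m_stop >= lo and hi >= m_start and module not in seen:
--                     seen.add(module)
--                     mods.append(module)
--         result[region] = mods
--     return result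
-- ===== Notes on version B (the rewrite author's own statement) =====
-- stated objective: faster
-- what changed: B builds a gene->[(module, positions)] index over the module dict once and, per region gene, iterates only the modules recorded for that gene (with a seen-set for the duplicate check), instead of A's rescan of every module for every region-gene pair.
import Mathlib
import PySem

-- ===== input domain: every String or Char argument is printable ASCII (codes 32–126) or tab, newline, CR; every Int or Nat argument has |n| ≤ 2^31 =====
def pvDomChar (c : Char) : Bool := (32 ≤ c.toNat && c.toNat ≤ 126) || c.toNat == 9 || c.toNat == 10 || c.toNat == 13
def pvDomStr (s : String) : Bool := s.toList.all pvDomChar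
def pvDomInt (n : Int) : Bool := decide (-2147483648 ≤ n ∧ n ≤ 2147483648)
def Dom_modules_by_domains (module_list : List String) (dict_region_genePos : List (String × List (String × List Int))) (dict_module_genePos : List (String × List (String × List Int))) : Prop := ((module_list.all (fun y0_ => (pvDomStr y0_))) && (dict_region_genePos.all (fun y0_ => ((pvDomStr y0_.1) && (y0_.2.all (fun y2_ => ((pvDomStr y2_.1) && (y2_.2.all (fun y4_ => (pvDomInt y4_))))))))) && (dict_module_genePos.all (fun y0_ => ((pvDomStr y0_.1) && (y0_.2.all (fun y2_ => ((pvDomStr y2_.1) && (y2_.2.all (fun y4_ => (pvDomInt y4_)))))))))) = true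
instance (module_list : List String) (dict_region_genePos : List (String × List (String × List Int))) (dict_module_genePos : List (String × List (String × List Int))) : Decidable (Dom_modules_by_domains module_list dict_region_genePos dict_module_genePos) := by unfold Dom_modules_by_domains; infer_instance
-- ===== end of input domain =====

-- B replaces A's rescan of every module for every region-gene by a gene→modules index built
-- once, plus a per-region seen-set for the duplicate check (objective: faster, asymptotic).

-- ===== PORT A =====
def modules_by_domains (module_list : List String) (dict_region_genePos : List (String × List (String × List Int))) (dict_module_genePos : List (String × List (String × List Int))) : List (String × List String) :=
  let dM := PySem.Dict.ofList dict_module_genePos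
  -- {region : [] for region in dict_region_genePos}
  let d0 := (PySem.Dict.ofList dict_region_genePos).items.foldl
      (fun d rg => d.insert rg.1 ([] : List String)) PySem.Dict.empty
  ((PySem.Dict.ofList dict_region_genePos).items.foldl (fun d rg =>
    (PySem.Dict.ofList rg.2).items.foldl (fun d gp =>
      let r_start := PySem.List.pyGetD gp.2 0 0
      let r_stop := PySem.List.pyGetD gp.2 1 0
      dM.items.foldl (fun d mm =>
        if (PySem.Dict.ofList mm.2).contains gp.1 then
          let m_pos := (PySem.Dict.ofList mm.2).getD gp.1 []
          let m_start := PySem.List.pyGetD m_pos 0 0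
          let m_stop := PySem.List.pyGetD m_pos 1 0
          if m_stop ≥ r_start - 50 ∧ r_stop + 50 ≥ m_start then
            if (d.getD rg.1 []).contains mm.1 = false then
              d.insert rg.1 ((d.getD rg.1 []) ++ [mm.1])
            else d
          else d
        else d) d) d) d0).items

-- ===== PORT B =====
def modules_by_domains_alt (module_list : List String) (dict_region_genePos : List (String × List (String × List Int))) (dict_module_genePos : List (String × List (String × List Int))) : List (String × List String) :=
  -- gene_index: gene -> [(module, m_pos)], built once
  let gene_index := (PySem.Dict.ofList dict_module_genePos).items.foldl (fun gi mm =>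
      (PySem.Dict.ofList mm.2).items.foldl (fun gi gp =>
        gi.modify gp.1 [] (fun x => x ++ [(mm.1, gp.2)])) gi) PySem.Dict.empty
  ((PySem.Dict.ofList dict_region_genePos).items.foldl (fun res rg =>
    let fin := (PySem.Dict.ofList rg.2).items.foldl (fun (acc : List String × PySem.Set String) gp =>
      let lo := PySem.List.pyGetD gp.2 0 0 - 50
      let hi := PySem.List.pyGetD gp.2 1 0 + 50
      (gene_index.getD gp.1 []).foldl (fun acc e =>
        let m_start := PySem.List.pyGetD e.2 0 0
        let m_stop := PySem.List.pyGetD e.2 1 0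
        if m_stop ≥ lo ∧ hi ≥ m_start ∧ acc.2.contains e.1 = false then
          (acc.1 ++ [e.1], acc.2.add e.1)
        else acc) acc) (([] : List String), PySem.Set.empty)
    res.insert rg.1 fin.1) PySem.Dict.empty).items

-- ===== PRECONDITION & SPEC =====
-- Pre_ is exactly the inputs where the Python A returns: every position list of a region gene
-- has at least 2 entries, and so has every position a module records for such a region gene
-- (A indexes r_pos[0], r_pos[1] and m_pos[0], m_pos[1] there; IndexError otherwise).
def Pre_modules_by_domains (module_list : List String) (dict_region_genePos : List (String × List (String × List Int))) (dict_module_genePos : List (String × List (String × List Int))) : Prop :=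
  ((PySem.Dict.ofList dict_region_genePos).items.all (fun rg =>
     (PySem.Dict.ofList rg.2).items.all (fun gp =>
       decide (2 ≤ gp.2.length) &&
       (PySem.Dict.ofList dict_module_genePos).items.all (fun mm =>
         match (PySem.Dict.ofList mm.2).get? gp.1 with
         | some mp => decide (2 ≤ mp.length)
         | none => true)))) = true
instance (module_list : List String) (dict_region_genePos : List (String × List (String × List Int))) (dict_module_genePos : List (String × List (String × List Int))) : Decidable (Pre_modules_by_domains module_list dict_region_genePos dict_module_genePos) := by unfold Pre_modules_by_domains; infer_instance
def pvWitness_modules_by_domains : List String × (List (String × List (String × List Int))) × (List (String × List (String × List Int))) :=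
  (["m1"], [("r1", [("g1", [0, 10])]), ("r2", [("g2", [100, 120])])], [("m1", [("g1", [5, 20])]), ("m2", [("g2", [500, 600])])])

def Spec_modules_by_domains (module_list : List String) (dict_region_genePos : List (String × List (String × List Int))) (dict_module_genePos : List (String × List (String × List Int))) (out : List (String × List String)) : Prop := out = modules_by_domains_alt module_list dict_region_genePos dict_module_genePos
instance (module_list : List String) (dict_region_genePos : List (String × List (String × List Int))) (dict_module_genePos : List (String × List (String × List Int))) (out : List (String × List String)) : Decidable (Spec_modules_by_domains module_list dict_region_genePos dict_module_genePos out) := by unfold Spec_modules_by_domains; infer_instance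

-- ===== CLAIM (what is proved, stated in full; the proofs are below) =====
def Claim_equal_modules_by_domains : Prop := ∀ (module_list : List String) (dict_region_genePos : List (String × List (String × List Int))) (dict_module_genePos : List (String × List (String × List Int))), Dom_modules_by_domains module_list dict_region_genePos dict_module_genePos → Pre_modules_by_domains module_list dict_region_genePos dict_module_genePos → Spec_modules_by_domains module_list dict_region_genePos dict_module_genePos (modules_by_domains module_list dict_region_genePos dict_module_genePos)

-- ===== LEMMAS AND PROOFS =====

-- A's per-(region,gene) scan over all modules, as a pure function of the region's current list.
def mscanA (M : List (String × List (String × List Int))) (r_start r_stop : Int) (g : String) (L : List String) : List String :=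
  M.foldl (fun L mm =>
    if (PySem.Dict.ofList mm.2).contains g then
      if PySem.List.pyGetD ((PySem.Dict.ofList mm.2).getD g []) 1 0 ≥ r_start - 50 ∧
         r_stop + 50 ≥ PySem.List.pyGetD ((PySem.Dict.ofList mm.2).getD g []) 0 0 then
        if L.contains mm.1 = false then L ++ [mm.1] else L
      else L
    else L) L

-- A's per-region list (genes folded over mscanA).
def regionListA (M : List (String × List (String × List Int))) (gl : List (String × List Int)) (L : List String) : List String :=
  gl.foldl (fun L gp => mscanA M (PySem.List.pyGetD gp.2 0 0) (PySem.List.pyGetD gp.2 1 0) gp.1 L) L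

-- The dict body A uses, abbreviated for the lemmas.
def abodyM (r : String) (g : String) (rs rt : Int) (d : PySem.Dict String (List String)) (mm : String × List (String × List Int)) : PySem.Dict String (List String) :=
  if (PySem.Dict.ofList mm.2).contains g then
    if PySem.List.pyGetD ((PySem.Dict.ofList mm.2).getD g []) 1 0 ≥ rs - 50 ∧
       rt + 50 ≥ PySem.List.pyGetD ((PySem.Dict.ofList mm.2).getD g []) 0 0 then
      if (d.getD r []).contains mm.1 = false then
        d.insert r ((d.getD r []) ++ [mm.1])
      else d
    else d
  else d

theorem abodyM_get?_ne (r g : String) (rs rt : Int) (d : PySem.Dict String (List String)) (mm : String × List (String × List Int)) (x : String) (hx : x ≠ r) :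
    (abodyM r g rs rt d mm).get? x = d.get? x := by
  unfold abodyM
  split_ifs <;> simp [PySem.Dict.get?_insert, hx]

theorem abodyM_keys (r g : String) (rs rt : Int) (d : PySem.Dict String (List String)) (mm : String × List (String × List Int)) (hc : d.contains r = true) :
    (abodyM r g rs rt d mm).keys = d.keys := by
  unfold abodyM
  split_ifs <;> simp [PySem.Dict.keys_insert_of_contains _ _ hc]

theorem abodyM_contains (r g : String) (rs rt : Int) (d : PySem.Dict String (List String)) (mm : String × List (String × List Int)) (hc : d.contains r = true) :
    (abodyM r g rs rt d mm).contains r = true := by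
  unfold abodyM
  split_ifs <;> simp [hc]

theorem abodyM_getD (r g : String) (rs rt : Int) (d : PySem.Dict String (List String)) (mm : String × List (String × List Int)) :
    (abodyM r g rs rt d mm).getD r [] =
      (if (PySem.Dict.ofList mm.2).contains g then
        if PySem.List.pyGetD ((PySem.Dict.ofList mm.2).getD g []) 1 0 ≥ rs - 50 ∧
           rt + 50 ≥ PySem.List.pyGetD ((PySem.Dict.ofList mm.2).getD g []) 0 0 then
          if (d.getD r []).contains mm.1 = false then (d.getD r []) ++ [mm.1] else d.getD r []
        else d.getD r []
      else d.getD r []) := by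
  unfold abodyM
  split_ifs <;> simp

-- module scan at the dict level = mscanA at the list level (plus frame conditions)
theorem mfold_get?_ne (M : List (String × List (String × List Int))) (r g : String) (rs rt : Int) (x : String) (hx : x ≠ r) :
    ∀ (d : PySem.Dict String (List String)), (M.foldl (abodyM r g rs rt) d).get? x = d.get? x := by
  induction M with
  | nil => intro d; rfl
  | cons mm M ih =>
    intro d
    rw [List.foldl_cons, ih, abodyM_get?_ne _ _ _ _ _ _ _ hx]

theorem mfold_inv (M : List (String × List (String × List Int))) (r g : String) (rs rt : Int) :
    ∀ (d : PySem.Dict String (List String)), d.contains r = true →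
      (M.foldl (abodyM r g rs rt) d).keys = d.keys ∧
      (M.foldl (abodyM r g rs rt) d).contains r = true ∧
      (M.foldl (abodyM r g rs rt) d).getD r [] = mscanA M rs rt g (d.getD r []) := by
  induction M with
  | nil => intro d hc; exact ⟨rfl, hc, rfl⟩
  | cons mm M ih =>
    intro d hc
    rw [List.foldl_cons]
    obtain ⟨hk, hc2, hg⟩ := ih (abodyM r g rs rt d mm) (abodyM_contains r g rs rt d mm hc)
    refine ⟨by rw [hk, abodyM_keys r g rs rt d mm hc], hc2, ?_⟩
    rw [hg, abodyM_getD]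
    unfold mscanA
    rw [List.foldl_cons]

-- gene fold at the dict level = regionListA (plus frame conditions)
theorem gfold_get?_ne (M : List (String × List (String × List Int))) (r : String) (x : String) (hx : x ≠ r) :
    ∀ (gl : List (String × List Int)) (d : PySem.Dict String (List String)),
      (gl.foldl (fun d gp => M.foldl (abodyM r gp.1 (PySem.List.pyGetD gp.2 0 0) (PySem.List.pyGetD gp.2 1 0)) d) d).get? x = d.get? x := by
  intro gl
  induction gl with
  | nil => intro d; rfl
  | cons gp gl ih => intro d; rw [List.foldl_cons, ih, mfold_get?_ne _ _ _ _ _ _ hx]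

theorem gfold_inv (M : List (String × List (String × List Int))) (r : String) :
    ∀ (gl : List (String × List Int)) (d : PySem.Dict String (List String)), d.contains r = true →
      (gl.foldl (fun d gp => M.foldl (abodyM r gp.1 (PySem.List.pyGetD gp.2 0 0) (PySem.List.pyGetD gp.2 1 0)) d) d).keys = d.keys ∧
      (gl.foldl (fun d gp => M.foldl (abodyM r gp.1 (PySem.List.pyGetD gp.2 0 0) (PySem.List.pyGetD gp.2 1 0)) d) d).contains r = true ∧
      (gl.foldl (fun d gp => M.foldl (abodyM r gp.1 (PySem.List.pyGetD gp.2 0 0) (PySem.List.pyGetD gp.2 1 0)) d) d).getD r [] = regionListA M gl (d.getD r []) := by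
  intro gl
  induction gl with
  | nil => intro d hc; exact ⟨rfl, hc, rfl⟩
  | cons gp gl ih =>
    intro d hc
    rw [List.foldl_cons]
    obtain ⟨hk1, hc1, hg1⟩ := mfold_inv M r gp.1 (PySem.List.pyGetD gp.2 0 0) (PySem.List.pyGetD gp.2 1 0) d hc
    obtain ⟨hk2, hc2, hg2⟩ := ih _ hc1
    refine ⟨by rw [hk2, hk1], hc2, ?_⟩
    rw [hg2, hg1]
    rfl

-- the region-level step of A
def rstepA (M : List (String × List (String × List Int))) (d : PySem.Dict String (List String)) (rg : String × List (String × List Int)) : PySem.Dict String (List String) :=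
  (PySem.Dict.ofList rg.2).items.foldl (fun d gp => M.foldl (abodyM rg.1 gp.1 (PySem.List.pyGetD gp.2 0 0) (PySem.List.pyGetD gp.2 1 0)) d) d

theorem rfold_get?_ne (M : List (String × List (String × List Int))) (x : String) :
    ∀ (R : List (String × List (String × List Int))), (∀ rg ∈ R, x ≠ rg.1) →
      ∀ (d : PySem.Dict String (List String)), (R.foldl (rstepA M) d).get? x = d.get? x := by
  intro R
  induction R with
  | nil => intro _ d; rfl
  | cons rg R ih =>
    intro h d
    rw [List.foldl_cons, ih (fun r hr => h r (List.mem_cons_of_mem _ hr))]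
    unfold rstepA
    exact gfold_get?_ne M rg.1 x (h rg List.mem_cons_self) (PySem.Dict.ofList rg.2).items d

theorem rfold_inv (M : List (String × List (String × List Int))) :
    ∀ (R : List (String × List (String × List Int))) (d : PySem.Dict String (List String)),
      (R.map Prod.fst).Nodup → (∀ rg ∈ R, d.get? rg.1 = some []) →
      (R.foldl (rstepA M) d).keys = d.keys ∧
      ∀ rg ∈ R, (R.foldl (rstepA M) d).getD rg.1 [] = regionListA M (PySem.Dict.ofList rg.2).items [] := by
  intro R
  induction R with
  | nil => intro d _ _; exact ⟨rfl, by simp⟩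
  | cons rg R ih =>
    intro d hnd h0
    rw [List.foldl_cons]
    have hc : d.contains rg.1 = true := by
      rw [PySem.Dict.contains_eq_isSome_get?, h0 rg List.mem_cons_self]; rfl
    obtain ⟨hk1, _, hg1⟩ := gfold_inv M rg.1 (PySem.Dict.ofList rg.2).items d hc
    have hk1' : (rstepA M d rg).keys = d.keys := hk1
    have hg1' : (rstepA M d rg).getD rg.1 [] = regionListA M (PySem.Dict.ofList rg.2).items (d.getD rg.1 []) := hg1
    have hne : ∀ r' ∈ R, rg.1 ≠ r'.1 := by
      intro r' hr' heq
      exact (List.nodup_cons.mp hnd).1 (heq ▸ List.mem_map_of_mem hr')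
    have h0' : ∀ r' ∈ R, (rstepA M d rg).get? r'.1 = some [] := by
      intro r' hr'
      have hpres : (rstepA M d rg).get? r'.1 = d.get? r'.1 := by
        unfold rstepA
        exact gfold_get?_ne M rg.1 r'.1 (fun heq => hne r' hr' heq.symm) (PySem.Dict.ofList rg.2).items d
      rw [hpres]
      exact h0 r' (List.mem_cons_of_mem _ hr')
    obtain ⟨hk2, hg2⟩ := ih (rstepA M d rg) (List.nodup_cons.mp hnd).2 h0'
    refine ⟨by rw [hk2, hk1'], ?_⟩
    intro r' hr'
    rcases List.mem_cons.mp hr' with heq | hmem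
    · rw [heq]
      have hpres : (List.foldl (rstepA M) (rstepA M d rg) R).get? rg.1 = (rstepA M d rg).get? rg.1 :=
        rfold_get?_ne M rg.1 R hne (rstepA M d rg)
      rw [PySem.Dict.getD_eq_get?_getD, hpres, ← PySem.Dict.getD_eq_get?_getD, hg1']
      have hdz : d.getD rg.1 [] = [] := by
        rw [PySem.Dict.getD_eq_get?_getD, h0 rg List.mem_cons_self]; rfl
      rw [hdz]
    · exact hg2 r' hmem

-- ========== B side ==========

-- the gene index of B
def bidx (M : List (String × List (String × List Int))) : PySem.Dict String (List (String × List Int)) :=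
  M.foldl (fun gi mm =>
    (PySem.Dict.ofList mm.2).items.foldl (fun gi gp =>
      gi.modify gp.1 [] (fun x => x ++ [(mm.1, gp.2)])) gi) PySem.Dict.empty

-- entries the index stores for a gene, per module
def fidx (g : String) (mm : String × List (String × List Int)) : List (String × List Int) :=
  ((PySem.Dict.ofList mm.2).items.filter (fun gp => gp.1 == g)).map (fun gp => (mm.1, gp.2))

theorem idx_getD_gen (g : String) :
    ∀ (M : List (String × List (String × List Int))) (gi : PySem.Dict String (List (String × List Int))),
      ((M.foldl (fun gi mm =>
        (PySem.Dict.ofList mm.2).items.foldl (fun gi gp =>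
          gi.modify gp.1 [] (fun x => x ++ [(mm.1, gp.2)])) gi) gi).getD g []) =
        gi.getD g [] ++ M.flatMap (fidx g) := by
  intro M
  induction M with
  | nil => intro gi; simp
  | cons mm M ih =>
    intro gi
    rw [List.foldl_cons, ih]
    have h := PySem.Dict.getD_foldl_modify_append
      ((PySem.Dict.ofList mm.2).items.map (fun gp => (gp.1, (mm.1, gp.2)))) gi g
    rw [List.foldl_map] at h
    rw [h]
    unfold fidx
    simp [List.filter_map, List.map_map, Function.comp_def]

theorem idx_getD (g : String) (M : List (String × List (String × List Int))) :
    (bidx M).getD g [] = M.flatMap (fidx g) := by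
  unfold bidx
  rw [idx_getD_gen]
  simp [PySem.Dict.getD_empty]

-- filter of a nodup-keyed item list = singleton from get?
theorem filt_get? {β : Type} (g : String) :
    ∀ (l : List (String × β)), (l.map Prod.fst).Nodup →
      l.filter (fun p => p.1 == g) = ((PySem.Dict.mk l).get? g).elim [] (fun v => [(g, v)]) := by
  intro l
  induction l with
  | nil => intro _; rfl
  | cons kv l ih =>
    intro hnd
    rw [List.filter_cons, PySem.Dict.get?_mk_cons]
    by_cases hk : kv.1 = g
    · subst hk
      simp only [beq_self_eq_true, if_pos]
      have hz : l.filter (fun p => p.1 == kv.1) = [] := by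
        rw [List.filter_eq_nil_iff]
        intro p hp hbeq
        exact (List.nodup_cons.mp hnd).1 ((eq_of_beq hbeq) ▸ List.mem_map_of_mem hp)
      rw [hz]
      rfl
    · have hb : (kv.1 == g) = false := beq_eq_false_iff_ne.mpr hk
      rw [hb]
      simp only [if_false, Bool.false_eq_true]
      exact ih (List.nodup_cons.mp hnd).2

theorem fidx_eq (g : String) (mm : String × List (String × List Int)) :
    fidx g mm = (((PySem.Dict.ofList mm.2).get? g).elim [] (fun v => [(g, v)])).map (fun gp => (mm.1, gp.2)) := by
  unfold fidx
  have hnd : ((PySem.Dict.ofList mm.2).items.map Prod.fst).Nodup :=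
    PySem.Dict.nodup_keys_ofList mm.2
  rw [filt_get? g (PySem.Dict.ofList mm.2).items hnd]

-- B's inner fold over the index entries of gene g = A's module scan, with seen = list
theorem bscan_eq (M : List (String × List (String × List Int))) (g : String) (rs rt : Int) :
    ∀ (L : List String),
      ((M.flatMap (fidx g)).foldl (fun (acc : List String × PySem.Set String) e =>
          if PySem.List.pyGetD e.2 1 0 ≥ rs - 50 ∧ rt + 50 ≥ PySem.List.pyGetD e.2 0 0 ∧ acc.2.contains e.1 = false then
            (acc.1 ++ [e.1], acc.2.add e.1)
          else acc) (L, L)) = (mscanA M rs rt g L, mscanA M rs rt g L) := by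
  induction M with
  | nil => intro L; rfl
  | cons mm M ih =>
    intro L
    rw [List.flatMap_cons, List.foldl_append]
    unfold mscanA
    rw [List.foldl_cons]
    rw [fidx_eq]
    cases hq : (PySem.Dict.ofList mm.2).get? g with
    | none =>
      have hcf : (PySem.Dict.ofList mm.2).contains g = false := by
        rw [PySem.Dict.contains_eq_isSome_get?, hq]; rfl
      rw [hcf]
      simp only [Option.elim, List.map_nil, List.foldl_nil, Bool.false_eq_true, if_false]
      exact ih L
    | some v =>
      have hct : (PySem.Dict.ofList mm.2).contains g = true := by
        rw [PySem.Dict.contains_eq_isSome_get?, hq]; rfl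
      have hgd : (PySem.Dict.ofList mm.2).getD g [] = v := PySem.Dict.getD_of_get?_eq_some _ [] hq
      rw [hct, hgd]
      simp only [Option.elim, List.map_cons, List.map_nil, List.foldl_cons, List.foldl_nil, if_true]
      by_cases hcond : PySem.List.pyGetD v 1 0 ≥ rs - 50 ∧ rt + 50 ≥ PySem.List.pyGetD v 0 0
      · by_cases hmem : L.contains mm.1 = false
        · rw [if_pos ⟨hcond.1, hcond.2, hmem⟩, if_pos hcond, if_pos hmem]
          have hadd : PySem.Set.add L mm.1 = L ++ [mm.1] := by
            unfold PySem.Set.add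
            rw [show PySem.Set.contains L mm.1 = List.contains L mm.1 from rfl, hmem]
            simp
          rw [hadd]
          exact ih (L ++ [mm.1])
        · rw [if_neg (by intro h; exact hmem h.2.2), if_pos hcond, if_neg hmem]
          exact ih L
      · rw [if_neg (by intro h; exact hcond ⟨h.1, h.2.1⟩), if_neg hcond]
        exact ih L
  
-- B's per-region gene fold, with seen = list, equals regionListA
theorem bgene_eq (M : List (String × List (String × List Int))) :
    ∀ (gl : List (String × List Int)) (L : List String),
      (gl.foldl (fun (acc : List String × PySem.Set String) gp =>
        ((bidx M).getD gp.1 []).foldl (fun acc e =>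
          if PySem.List.pyGetD e.2 1 0 ≥ PySem.List.pyGetD gp.2 0 0 - 50 ∧
             PySem.List.pyGetD gp.2 1 0 + 50 ≥ PySem.List.pyGetD e.2 0 0 ∧ acc.2.contains e.1 = false then
            (acc.1 ++ [e.1], acc.2.add e.1)
          else acc) acc) (L, L)) = (regionListA M gl L, regionListA M gl L) := by
  intro gl
  induction gl with
  | nil => intro L; rfl
  | cons gp gl ih =>
    intro L
    rw [List.foldl_cons]
    unfold regionListA
    rw [List.foldl_cons]
    rw [idx_getD, bscan_eq M gp.1 (PySem.List.pyGetD gp.2 0 0) (PySem.List.pyGetD gp.2 1 0) L]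
    exact ih (mscanA M (PySem.List.pyGetD gp.2 0 0) (PySem.List.pyGetD gp.2 1 0) gp.1 L)

-- ========== assembly ==========

-- B's per-region value
def bval (M : List (String × List (String × List Int))) (rg : String × List (String × List Int)) : List String :=
  (((PySem.Dict.ofList rg.2).items).foldl (fun (acc : List String × PySem.Set String) gp =>
    ((bidx M).getD gp.1 []).foldl (fun acc e =>
      if PySem.List.pyGetD e.2 1 0 ≥ PySem.List.pyGetD gp.2 0 0 - 50 ∧
         PySem.List.pyGetD gp.2 1 0 + 50 ≥ PySem.List.pyGetD e.2 0 0 ∧ acc.2.contains e.1 = false then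
        (acc.1 ++ [e.1], acc.2.add e.1)
      else acc) acc) (([] : List String), PySem.Set.empty)).1

theorem bval_eq (M : List (String × List (String × List Int))) (rg : String × List (String × List Int)) :
    bval M rg = regionListA M (PySem.Dict.ofList rg.2).items [] := by
  unfold bval
  rw [show (([] : List String), (PySem.Set.empty : PySem.Set String)) = (([] : List String), ([] : List String)) from rfl]
  rw [bgene_eq M (PySem.Dict.ofList rg.2).items []]

theorem modules_by_domains_spec' (module_list : List String) (drg dmg : List (String × List (String × List Int))) :
    modules_by_domains module_list drg dmg = modules_by_domains_alt module_list drg dmg := by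
  have hndR : (((PySem.Dict.ofList drg).items).map Prod.fst).Nodup :=
    PySem.Dict.nodup_keys_ofList drg
  -- A side
  have hA : modules_by_domains module_list drg dmg =
      (((PySem.Dict.ofList drg).items).foldl (rstepA ((PySem.Dict.ofList dmg).items))
        (((PySem.Dict.ofList drg).items).foldl (fun d rg => d.insert rg.1 ([] : List String)) PySem.Dict.empty)).items := rfl
  have hd0items : (((PySem.Dict.ofList drg).items).foldl (fun d rg => d.insert rg.1 ([] : List String)) PySem.Dict.empty).items
      = ((PySem.Dict.ofList drg).items).map (fun rg => (rg.1, ([] : List String))) := by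
    have h := PySem.Dict.items_foldl_insert_fresh ((PySem.Dict.ofList drg).items) Prod.fst
      (fun _ => ([] : List String)) PySem.Dict.empty (fun a _ => PySem.Dict.contains_empty _) hndR
    simpa using h
  set d0 := (((PySem.Dict.ofList drg).items).foldl (fun d rg => d.insert rg.1 ([] : List String)) PySem.Dict.empty) with hd0
  have hd0keys : d0.keys = ((PySem.Dict.ofList drg).items).map Prod.fst := by
    show d0.items.map _ = _
    rw [hd0items, List.map_map]
    rfl
  have hd0nd : d0.keys.Nodup := by rw [hd0keys]; exact hndR
  have h0 : ∀ rg ∈ (PySem.Dict.ofList drg).items, d0.get? rg.1 = some [] := by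
    intro rg hrg
    exact PySem.Dict.get?_of_mem_items _ (by rw [hd0items]; exact List.mem_map_of_mem hrg) hd0nd
  obtain ⟨hkA, hgA⟩ := rfold_inv ((PySem.Dict.ofList dmg).items) ((PySem.Dict.ofList drg).items) d0 hndR h0
  set FA := ((PySem.Dict.ofList drg).items).foldl (rstepA ((PySem.Dict.ofList dmg).items)) d0 with hFA
  have hFAnd : FA.keys.Nodup := by rw [hkA]; exact hd0nd
  have hAitems : FA.items = ((PySem.Dict.ofList drg).items).map
      (fun rg => (rg.1, regionListA ((PySem.Dict.ofList dmg).items) (PySem.Dict.ofList rg.2).items [])) := by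
    rw [PySem.Dict.items_eq_map_keys FA hFAnd [], hkA, hd0keys, List.map_map]
    exact List.map_congr_left (fun rg hrg => by
      simp only [Function.comp_apply]
      rw [hgA rg hrg])
  -- B side
  have hB : modules_by_domains_alt module_list drg dmg =
      (((PySem.Dict.ofList drg).items).foldl (fun res rg =>
        res.insert rg.1 (bval ((PySem.Dict.ofList dmg).items) rg)) PySem.Dict.empty).items := rfl
  have hBitems : modules_by_domains_alt module_list drg dmg = ((PySem.Dict.ofList drg).items).map
      (fun rg => (rg.1, bval ((PySem.Dict.ofList dmg).items) rg)) := by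
    rw [hB]
    have h := PySem.Dict.items_foldl_insert_fresh ((PySem.Dict.ofList drg).items) Prod.fst
      (bval ((PySem.Dict.ofList dmg).items)) PySem.Dict.empty (fun a _ => PySem.Dict.contains_empty _) hndR
    simpa using h
  rw [hA, hAitems, hBitems]
  exact List.map_congr_left (fun rg _ => by rw [bval_eq])

-- ===== VERDICT (by name: the statement is the Claim_ definition above) =====
theorem modules_by_domains_spec : Claim_equal_modules_by_domains := by
  intro ml drg dmg _ _
  exact modules_by_domains_spec' ml drg dmg
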